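-- pv_equiv track=rewrite | github.com/kimyovin/CodingTestPractice | Programmers/L1/4주차.py | solution
-- ===== SOURCE A (Python) =====
-- def solution(table, languages, preference):
--     answer = []
--     job_score=[0 for _ in range(len(table))]
--
--     table = [[i for i in s.split(" ")]for s in table]
--     for i in range(len(table)):
--         for lan, pre in zip(languages, preference):
--             if lan in table[i]:
--                 job_score[i] += pre * (6-table[i].index(lan))
--     val = max(job_score)
--     for idx in range(len(job_score)):
--         if job_score[idx] == val:
--             answer.append(table[idx][0])
--
--     answer = sorted(answer)[0]
--     return answer
-- ===== SOURCE B (Python) =====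
-- def solution(table, languages, preference):
--     # Single streaming pass: keep the lexicographically smallest (-score, name) key.
--     # (min of (-score, name) = alphabetically-first name among maximal scores.)
--     best = None
--     for row in table:
--         toks = row.split(" ")
--         score = sum(p * (6 - toks.index(l)) for l, p in zip(languages, preference) if l in toks)
--         key = (-score, toks[0])
--         if best is None or key < best:
--             best = key
--     return best[1]
-- ===== Notes on version B (the rewrite author's own statement) =====
-- stated objective: simpler
-- what changed: B replaces A's build-score-array / take-max / collect-tied-names / sort-and-index selection with one streaming pass that keeps the lexicographic minimum of (-score, name), so the intermediate score list, the ties list and the sort disappear.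
import Mathlib
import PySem

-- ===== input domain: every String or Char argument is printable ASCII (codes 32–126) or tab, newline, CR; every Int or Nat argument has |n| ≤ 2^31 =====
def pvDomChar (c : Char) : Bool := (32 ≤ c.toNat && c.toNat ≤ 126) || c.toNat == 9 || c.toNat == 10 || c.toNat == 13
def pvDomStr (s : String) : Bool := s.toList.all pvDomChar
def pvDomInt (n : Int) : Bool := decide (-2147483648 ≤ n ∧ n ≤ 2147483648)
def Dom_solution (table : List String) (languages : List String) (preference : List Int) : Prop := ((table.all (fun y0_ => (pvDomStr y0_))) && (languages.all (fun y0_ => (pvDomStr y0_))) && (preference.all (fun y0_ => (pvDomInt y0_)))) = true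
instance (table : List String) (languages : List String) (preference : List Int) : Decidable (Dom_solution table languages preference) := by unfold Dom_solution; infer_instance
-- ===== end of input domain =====

-- B changes only the selection decomposition: one streaming pass keeping the lexicographic
-- minimum of (-score, name), instead of A's score array + max + ties list + sort (objective: simpler).

-- ===== PORT A =====
def solution (table : List String) (languages : List String) (preference : List Int) : String :=
  -- table = [[i for i in s.split(" ")] for s in table]
  let table2 : List (List String) := table.map (fun s => (PySem.Str.split? s " ").getD [])
  -- job_score = [0 for _ in range(len(table))]
  let job_score0 : List Int := (List.range table.length).map (fun _ => (0 : Int))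
  -- for i in range(len(table)): for lan, pre in zip(languages, preference): if lan in table[i]: job_score[i] += pre*(6-table[i].index(lan))
  let job_score : List Int :=
    (PySem.List.pyRange 0 table2.length 1).foldl (fun js i =>
      let row := (PySem.List.pyGet? table2 i).getD []
      (languages.zip preference).foldl (fun js lp =>
        if lp.1 ∈ row then
          js.set i.toNat ((js.getD i.toNat 0) + lp.2 * (6 - ((PySem.List.index? row lp.1).getD 0 : Int)))
        else js) js) job_score0
  -- val = max(job_score)  (raises ValueError on empty table: excluded by Pre_)
  match PySem.List.max? job_score (fun x => x) with
  | none => ""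
  | some val =>
    -- for idx in range(len(job_score)): if job_score[idx] == val: answer.append(table[idx][0])
    let answer : List String :=
      (PySem.List.pyRange 0 job_score.length 1).foldl (fun ans idx =>
        if (PySem.List.pyGet? job_score idx).getD 0 = val then
          ans ++ [(PySem.List.pyGet? ((PySem.List.pyGet? table2 idx).getD []) 0).getD ""]
        else ans) []
    -- answer = sorted(answer)[0]
    (PySem.List.sorted answer (fun x => x) false).headD ""

-- ===== PORT B =====
def solution_alt (table : List String) (languages : List String) (preference : List Int) : String :=
  let best : Option (Int × String) :=
    table.foldl (fun best row =>
      let toks := (PySem.Str.split? row " ").getD []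
      -- score = sum(p * (6 - toks.index(l)) for l, p in zip(languages, preference) if l in toks)
      let score : Int :=
        ((languages.zip preference).filterMap (fun lp =>
          if lp.1 ∈ toks then some (lp.2 * (6 - ((PySem.List.index? toks lp.1).getD 0 : Int))) else none)).sum
      let key : Int × String := (-score, (PySem.List.pyGet? toks 0).getD "")
      match best with
      | none => some key
      -- Python tuple '<' on (int, str) is lexicographic: first < or (first =, second <)
      | some b => if key.1 < b.1 ∨ (key.1 = b.1 ∧ key.2 < b.2) then some key else some b) none
  match best with
  | none => ""   -- best[1] on None: table = [] is excluded by Pre_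
  | some b => b.2

-- ===== PRECONDITION & SPEC =====
-- Pre_ excludes only table = [], on which A raises ValueError (max of empty) and B raises TypeError.
def Pre_solution (table : List String) (languages : List String) (preference : List Int) : Prop := table ≠ []
instance (table : List String) (languages : List String) (preference : List Int) : Decidable (Pre_solution table languages preference) := by unfold Pre_solution; infer_instance
def pvWitness_solution : List String × List String × List Int := (["python 3 a", "java b", "python c"], ["python", "java"], [5, 2])
def Spec_solution (table : List String) (languages : List String) (preference : List Int) (out : String) : Prop := out = solution_alt table languages preference
instance (table : List String) (languages : List String) (preference : List Int) (out : String) : Decidable (Spec_solution table languages preference out) := by unfold Spec_solution; infer_instance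

-- ===== CLAIM (what is proved, stated in full; the proofs are below) =====
def Claim_equal_solution : Prop := ∀ (table : List String) (languages : List String) (preference : List Int), Dom_solution table languages preference → Pre_solution table languages preference → Spec_solution table languages preference (solution table languages preference)

-- ===== LEMMAS AND PROOFS =====

lemma pvSetGetDSelf (js : List Int) (k : Nat) : js.set k (js.getD k 0) = js := by
  apply List.ext_getElem?
  intro i
  rcases eq_or_ne i k with rfl | h
  · by_cases hk : i < js.length
    · simp [hk, List.getD]
    · simp [List.set_eq_of_length_le (le_of_not_gt hk)]
  · simp [List.getElem?_set_ne (Ne.symm h)]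

lemma pvGetDSet (js : List Int) (k : Nat) (v : Int) :
    (js.set k v).getD k 0 = if k < js.length then v else 0 := by
  by_cases hk : k < js.length
  · simp [List.getD, hk]
  · simp [List.set_eq_of_length_le (le_of_not_gt hk), List.getD, hk]

-- score as sum of filterMap (B's comprehension) vs foldl-if (A's loop), shift lemma
lemma pvFoldlIfSum {α : Type} (c : α → Prop) [DecidablePred c] (v : α → Int) :
    ∀ (l : List α) (a : Int),
      l.foldl (fun s x => if c x then s + v x else s) a
        = a + (l.filterMap (fun x => if c x then some (v x) else none)).sum := by
  intro l
  induction l with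
  | nil => simp
  | cons x t ih =>
    intro a
    by_cases h : c x <;> simp [h, ih, add_assoc]

-- inner python loop: repeated set at fixed index k accumulates the score there
lemma pvInnerSet (row : List String) (w : String × Int → Int) (k : Nat) :
    ∀ (l : List (String × Int)) (js : List Int),
      l.foldl (fun js lp => if lp.1 ∈ row then js.set k (js.getD k 0 + w lp) else js) js
        = js.set k (js.getD k 0
            + l.foldl (fun s lp => if lp.1 ∈ row then s + w lp else s) 0) := by
  intro l
  induction l with
  | nil => intro js; simp only [List.foldl_nil, add_zero]; exact (pvSetGetDSelf js k).symm
  | cons lp t ih =>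
    intro js
    by_cases h : lp.1 ∈ row
    · simp only [List.foldl_cons, if_pos h]
      rw [ih, pvGetDSet, List.set_set,
        pvFoldlIfSum (fun lp : String × Int => lp.1 ∈ row) w,
        pvFoldlIfSum (fun lp : String × Int => lp.1 ∈ row) w]
      by_cases hk : k < js.length
      · rw [if_pos hk]; congr 1; ring
      · rw [if_neg hk, List.set_eq_of_length_le (le_of_not_gt hk),
          List.set_eq_of_length_le (le_of_not_gt hk)]
    · simp only [List.foldl_cons, if_neg h]
      exact ih js

-- an update loop touching only indices k+1 leaves the head alone
lemma pvFoldSetSucc (g : Nat → Int) :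
    ∀ (ks : List Nat) (a : Int) (jt : List Int),
      ks.foldl (fun js k => js.set (k + 1) (js.getD (k + 1) 0 + g (k + 1))) (a :: jt)
        = a :: ks.foldl (fun js k => js.set k (js.getD k 0 + g (k + 1))) jt := by
  intro ks
  induction ks with
  | nil => intro a jt; rfl
  | cons k t ih =>
    intro a jt
    simp only [List.foldl_cons, List.set_cons_succ, List.getD_cons_succ]
    exact ih a _

-- the outer loop over range writes score k at slot k: a zipWith
lemma pvOuterFold (f : List String → Int) :
    ∀ (zs : List (List String)) (js : List Int),
      (List.range zs.length).foldl
          (fun js k => js.set k (js.getD k 0 + f (zs.getD k []))) js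
        = List.zipWith (fun j z => j + f z) js zs ++ js.drop zs.length := by
  intro zs
  induction zs with
  | nil => intro js; simp
  | cons z zt ih =>
    intro js
    cases js with
    | nil =>
      simp only [List.length_cons, List.range_succ_eq_map, List.foldl_cons, List.foldl_map]
      have hnil : ∀ l : List Nat,
          List.foldl (fun (x : List Int) (y : Nat) =>
            x.set (y.succ) (x.getD (y.succ) 0 + f ((z :: zt).getD (y.succ) []))) [] l = [] := by
        intro l; induction l with
        | nil => rfl
        | cons a t ih2 => simpa using ih2
      simpa using hnil (List.range zt.length)
    | cons j jt =>
      simp only [List.length_cons, List.range_succ_eq_map, List.foldl_cons, List.foldl_map,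
        List.set_cons_zero, List.getD_cons_zero]
      have := pvFoldSetSucc (fun k => f ((z :: zt).getD k [])) (List.range zt.length)
        (j + f z) jt
      simp only [Nat.succ_eq_add_one] at this ⊢
      rw [this]
      simp only [List.getD_cons_succ]
      rw [ih jt]
      simp

lemma pvZipWithZero (f : List String → Int) :
    ∀ zs : List (List String),
      List.zipWith (fun j z => j + f z) ((List.range zs.length).map (fun _ => (0 : Int))) zs
        = zs.map f := by
  intro zs
  induction zs with
  | nil => rfl
  | cons z zt ih => simp only [List.length_cons, List.range_succ_eq_map, List.map_cons,
      List.map_map, List.zipWith_cons_cons, zero_add, List.map_inj_left] at *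
                    simpa [Function.comp_def] using ih

-- the collect loop over indices = filter + map over the rows themselves
lemma pvAnswerFold (v : Int) (f : List String → Int) (g : List String → String) :
    ∀ (zs : List (List String)) (acc : List String),
      (List.range zs.length).foldl
          (fun ans k => if f (zs.getD k []) = v then ans ++ [g (zs.getD k [])] else ans) acc
        = acc ++ (zs.filter (fun z => decide (f z = v))).map g := by
  intro zs
  induction zs with
  | nil => intro acc; simp
  | cons z zt ih =>
    intro acc
    simp only [List.length_cons, List.range_succ_eq_map, List.foldl_cons, List.foldl_map,
      List.getD_cons_zero, List.getD_cons_succ, List.filter_cons]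
    by_cases h : f z = v
    · simp only [if_pos h, h, decide_true]
      rw [ih]
      simp
    · simp only [if_neg h, decide_eq_true_eq, h, if_false]
      rw [ih]

-- lexicographic order on (Int, String) keys, as Python compares tuples
def pvLexLe (a b : Int × String) : Prop := a.1 < b.1 ∨ (a.1 = b.1 ∧ a.2 ≤ b.2)

lemma pvLexLe_refl (a : Int × String) : pvLexLe a a := Or.inr ⟨rfl, le_refl _⟩

lemma pvLexLe_of_not_lt {a b : Int × String}
    (h : ¬ (a.1 < b.1 ∨ (a.1 = b.1 ∧ a.2 < b.2))) : pvLexLe b a := by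
  push_neg at h
  rcases eq_or_lt_of_le h.1 with e | hlt
  · exact Or.inr ⟨e, h.2 e.symm⟩
  · exact Or.inl hlt

lemma pvLexLe_trans {a b c : Int × String} (h1 : pvLexLe a b) (h2 : pvLexLe b c) :
    pvLexLe a c := by
  rcases h1 with h1 | ⟨e1, l1⟩ <;> rcases h2 with h2 | ⟨e2, l2⟩
  · exact Or.inl (h1.trans h2)
  · exact Or.inl (e2 ▸ h1)
  · exact Or.inl (e1 ▸ h2)
  · exact Or.inr ⟨e1.trans e2, l1.trans l2⟩

lemma pvLexLe_antisymm {a b : Int × String} (h1 : pvLexLe a b) (h2 : pvLexLe b a) :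
    a = b := by
  rcases h1 with h1 | ⟨e1, l1⟩ <;> rcases h2 with h2 | ⟨e2, l2⟩
  · exact absurd (h1.trans h2) (lt_irrefl _)
  · exact absurd (e2 ▸ h1) (lt_irrefl _)
  · exact absurd (e1 ▸ h2) (lt_irrefl _)
  · exact Prod.ext e1 (le_antisymm l1 l2)

-- the streaming-min step of B
def pvMinStep (best : Option (Int × String)) (k : Int × String) : Option (Int × String) :=
  match best with
  | none => some k
  | some b => if k.1 < b.1 ∨ (k.1 = b.1 ∧ k.2 < b.2) then some k else some b

lemma pvMinFold (l : List (Int × String)) :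
    ∀ b : Int × String, ∃ m, l.foldl pvMinStep (some b) = some m ∧
      (m = b ∨ m ∈ l) ∧ pvLexLe m b ∧ ∀ x ∈ l, pvLexLe m x := by
  induction l with
  | nil => intro b; exact ⟨b, rfl, Or.inl rfl, pvLexLe_refl b, by simp⟩
  | cons k t ih =>
    intro b
    simp only [List.foldl_cons, pvMinStep]
    by_cases h : k.1 < b.1 ∨ (k.1 = b.1 ∧ k.2 < b.2)
    · rw [if_pos h]
      obtain ⟨m, hm, hmem, hle, hall⟩ := ih k
      refine ⟨m, hm, ?_, ?_, ?_⟩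
      · rcases hmem with rfl | hmem
        · exact Or.inr (List.mem_cons_self)
        · exact Or.inr (List.mem_cons_of_mem _ hmem)
      · rcases h with h | ⟨e, hlt⟩
        · exact pvLexLe_trans hle (Or.inl h)
        · exact pvLexLe_trans hle (Or.inr ⟨e, le_of_lt hlt⟩)
      · intro x hx
        rcases List.mem_cons.mp hx with rfl | hx
        · exact hle
        · exact hall x hx
    · rw [if_neg h]
      obtain ⟨m, hm, hmem, hle, hall⟩ := ih b
      refine ⟨m, hm, ?_, hle, ?_⟩
      · rcases hmem with rfl | hmem
        · exact Or.inl rfl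
        · exact Or.inr (List.mem_cons_of_mem _ hmem)
      · intro x hx
        rcases List.mem_cons.mp hx with rfl | hx
        · exact pvLexLe_trans hle (pvLexLe_of_not_lt h)
        · exact hall x hx


-- proof-side abbreviations for the shared pieces of the two ports
def pvSp (s : String) : List String := (PySem.Str.split? s " ").getD []
def pvScore (langs : List String) (pref : List Int) (row : List String) : Int :=
  (langs.zip pref).foldl (fun s lp =>
    if lp.1 ∈ row then s + lp.2 * (6 - ((PySem.List.index? row lp.1).getD 0 : Int)) else s) 0
def pvName (row : List String) : String := (PySem.List.pyGet? row 0).getD ""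
def pvKey (langs : List String) (pref : List Int) (row : List String) : Int × String :=
  (-(pvScore langs pref row), pvName row)

-- A's value, re-expressed over the split rows
lemma pvA_eq (table langs : List String) (pref : List Int) :
    solution table langs pref =
      match PySem.List.max? ((table.map pvSp).map (pvScore langs pref)) (fun x => x) with
      | none => ""
      | some val =>
        (PySem.List.sorted
          (((table.map pvSp).filter (fun r => decide (pvScore langs pref r = val))).map pvName)
          (fun x => x) false).headD "" := by
  unfold solution
  have hjs :
      (PySem.List.pyRange 0 ((table.map (fun s => (PySem.Str.split? s " ").getD [])).length) 1).foldl
        (fun js i =>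
          let row := (PySem.List.pyGet? (table.map (fun s => (PySem.Str.split? s " ").getD [])) i).getD []
          (langs.zip pref).foldl (fun js lp =>
            if lp.1 ∈ row then
              js.set i.toNat ((js.getD i.toNat 0)
                + lp.2 * (6 - ((PySem.List.index? row lp.1).getD 0 : Int)))
            else js) js)
        ((List.range table.length).map (fun _ => (0 : Int)))
      = (table.map pvSp).map (pvScore langs pref) := by
    simp only [show (fun s => (PySem.Str.split? s " ").getD []) = pvSp from rfl]
    rw [show ((((table.map pvSp).length : Nat) : Int)) = ((table.map pvSp).length : Int) from rfl,
      PySem.List.pyRange_zero_natCast, List.foldl_map]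
    have hb : (fun (js : List Int) (k : Nat) =>
        let row := (PySem.List.pyGet? (table.map pvSp) (k : Int)).getD []
        (langs.zip pref).foldl (fun js lp =>
          if lp.1 ∈ row then
            js.set ((k : Int)).toNat ((js.getD ((k : Int)).toNat 0)
              + lp.2 * (6 - ((PySem.List.index? row lp.1).getD 0 : Int)))
          else js) js)
        = (fun js k => js.set k (js.getD k 0
            + pvScore langs pref ((table.map pvSp).getD k []))) := by
      funext js k
      simp only [PySem.List.pyGet?_natCast, Int.toNat_natCast, ← List.getD_eq_getElem?_getD]
      rw [pvInnerSet ((table.map pvSp).getD k [])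
        (fun lp => lp.2 * (6 - ((PySem.List.index? ((table.map pvSp).getD k []) lp.1).getD 0 : Int))) k]
      rfl
    rw [hb, pvOuterFold (pvScore langs pref) (table.map pvSp)]
    have hz := pvZipWithZero (pvScore langs pref) (table.map pvSp)
    simp only [List.length_map] at hz ⊢
    rw [hz]
    simp
  dsimp only
  rw [hjs]
  cases hM : PySem.List.max? ((table.map pvSp).map (pvScore langs pref)) (fun x => x) with
  | none => rfl
  | some val =>
    simp only [show (fun s => (PySem.Str.split? s " ").getD []) = pvSp from rfl]
    have hans :
        (PySem.List.pyRange 0 (((table.map pvSp).map (pvScore langs pref)).length : Int)).foldl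
          (fun ans idx =>
            if (PySem.List.pyGet? ((table.map pvSp).map (pvScore langs pref)) idx).getD 0 = val then
              ans ++ [(PySem.List.pyGet? ((PySem.List.pyGet? (table.map pvSp) idx).getD []) 0).getD ""]
            else ans) []
        = ((table.map pvSp).filter (fun r => decide (pvScore langs pref r = val))).map pvName := by
      rw [show ((((table.map pvSp).map (pvScore langs pref)).length : Nat) : Int)
          = ((((table.map pvSp).map (pvScore langs pref)).length : Nat) : Int) from rfl,
        PySem.List.pyRange_zero_natCast, List.foldl_map]
      have hcg := PySem.List.foldl_congr_mem
        (List.range ((table.map pvSp).map (pvScore langs pref)).length)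
        (fun (ans : List String) (k : Nat) =>
          if (PySem.List.pyGet? ((table.map pvSp).map (pvScore langs pref)) (k : Int)).getD 0 = val then
            ans ++ [(PySem.List.pyGet? ((PySem.List.pyGet? (table.map pvSp) (k : Int)).getD []) 0).getD ""]
          else ans)
        (fun ans k =>
          if pvScore langs pref ((table.map pvSp).getD k []) = val then
            ans ++ [pvName ((table.map pvSp).getD k [])] else ans)
        [] ?_
      · rw [hcg]
        have ha := pvAnswerFold val (pvScore langs pref) pvName (table.map pvSp) []
        simp only [List.length_map] at ha ⊢
        simpa using ha
      · intro acc k hk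
        simp only [List.mem_range, List.length_map] at hk
        simp [PySem.List.pyGet?_natCast, List.getElem?_map, List.getD_eq_getElem?_getD,
          List.getElem?_eq_getElem hk, pvName]
    rw [hans]

-- B's value, re-expressed over the split rows
lemma pvB_eq (table langs : List String) (pref : List Int) :
    solution_alt table langs pref =
      match List.foldl pvMinStep none ((table.map pvSp).map (pvKey langs pref)) with
      | none => ""
      | some m => m.2 := by
  unfold solution_alt
  have hfold :
      table.foldl (fun best row =>
        let toks := (PySem.Str.split? row " ").getD []
        let score : Int :=
          ((langs.zip pref).filterMap (fun lp =>
            if lp.1 ∈ toks then some (lp.2 * (6 - ((PySem.List.index? toks lp.1).getD 0 : Int)))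
            else none)).sum
        let key : Int × String := (-score, (PySem.List.pyGet? toks 0).getD "")
        match best with
        | none => some key
        | some b => if key.1 < b.1 ∨ (key.1 = b.1 ∧ key.2 < b.2) then some key else some b) none
      = List.foldl pvMinStep none ((table.map pvSp).map (pvKey langs pref)) := by
    rw [List.map_map, List.foldl_map]
    apply PySem.List.foldl_congr_mem
    intro best row _
    show _ = pvMinStep best (pvKey langs pref (pvSp row))
    have hscore : ((langs.zip pref).filterMap (fun lp =>
        if lp.1 ∈ ((PySem.Str.split? row " ").getD []) then
          some (lp.2 * (6 - ((PySem.List.index? ((PySem.Str.split? row " ").getD []) lp.1).getD 0 : Int)))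
        else none)).sum
        = pvScore langs pref ((PySem.Str.split? row " ").getD []) := by
      rw [pvScore, pvFoldlIfSum (fun lp : String × Int => lp.1 ∈ ((PySem.Str.split? row " ").getD []))
        (fun lp => lp.2 * (6 - ((PySem.List.index? ((PySem.Str.split? row " ").getD []) lp.1).getD 0 : Int)))]
      ring
    simp only [pvMinStep, pvKey, pvName, pvSp]
    cases best with
    | none => dsimp only; rw [hscore]
    | some b => dsimp only; rw [hscore]
  rw [hfold]

-- the selection equivalence: min of (-score, name) = alphabetically first name among max scores
lemma pvSelect (langs : List String) (pref : List Int) (zs : List (List String)) (hz : zs ≠ []) :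
    (match PySem.List.max? (zs.map (pvScore langs pref)) (fun x => x) with
      | none => ""
      | some val =>
        (PySem.List.sorted
          ((zs.filter (fun r => decide (pvScore langs pref r = val))).map pvName)
          (fun x => x) false).headD "")
    = match List.foldl pvMinStep none (zs.map (pvKey langs pref)) with
      | none => ""
      | some m => m.2 := by
  cases hM : PySem.List.max? (zs.map (pvScore langs pref)) (fun x => x) with
  | none =>
    exact absurd (by simpa [List.map_eq_nil_iff] using (PySem.List.max?_eq_none_iff _ _).mp hM) hz
  | some val =>
    obtain ⟨r0, hr0, hfr0⟩ := List.mem_map.mp (PySem.List.max?_mem hM)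
    have hansne :
        ((zs.filter (fun r => decide (pvScore langs pref r = val))).map pvName) ≠ [] := by
      simp only [ne_eq, List.map_eq_nil_iff, List.filter_eq_nil_iff, not_forall]
      exact ⟨r0, hr0, by simp [hfr0]⟩
    cases hs : PySem.List.sorted
        ((zs.filter (fun r => decide (pvScore langs pref r = val))).map pvName)
        (fun x => x) false with
    | nil => exact absurd ((PySem.List.sorted_eq_nil_iff _ _ _).mp hs) hansne
    | cons h t =>
      have hmemh : h ∈ (zs.filter (fun r => decide (pvScore langs pref r = val))).map pvName :=
        (PySem.List.mem_sorted _ _ _ _).mp (hs ▸ List.mem_cons_self)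
      have hmin : ∀ y ∈ (zs.filter (fun r => decide (pvScore langs pref r = val))).map pvName,
          h ≤ y := PySem.List.key_head_sorted_le _ _ hs
      -- the minimal key (-val, h) bounds every key from below
      have hLB : ∀ x ∈ zs.map (pvKey langs pref), pvLexLe (-val, h) x := by
        intro x hx
        obtain ⟨r, hr, rfl⟩ := List.mem_map.mp hx
        have hfr : pvScore langs pref r ≤ val :=
          PySem.List.max?_isMax hM _ (List.mem_map_of_mem hr)
        rcases eq_or_lt_of_le hfr with he | hlt
        · refine Or.inr ⟨by simp [pvKey, he], ?_⟩
          exact hmin _ (List.mem_map_of_mem (List.mem_filter.mpr ⟨hr, by simp [he]⟩))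
        · exact Or.inl (by simpa [pvKey] using hlt)
      -- and it is itself one of the keys
      have hMem : (-val, h) ∈ zs.map (pvKey langs pref) := by
        obtain ⟨r1, hr1, rfl⟩ := List.mem_map.mp hmemh
        have hf1 : pvScore langs pref r1 = val := by
          simpa using (List.mem_filter.mp hr1).2
        exact List.mem_map.mpr ⟨r1, (List.mem_filter.mp hr1).1, by simp [pvKey, hf1]⟩
      cases zs with
      | nil => exact absurd rfl hz
      | cons z zt =>
        obtain ⟨m, hm, hmem, hle, hall⟩ := pvMinFold (zt.map (pvKey langs pref)) (pvKey langs pref z)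
        have hfold : List.foldl pvMinStep none ((z :: zt).map (pvKey langs pref)) = some m := by
          simpa [pvMinStep] using hm
        have hmK : m ∈ (z :: zt).map (pvKey langs pref) := by
          rcases hmem with rfl | hmem
          · exact List.mem_map_of_mem List.mem_cons_self
          · exact List.mem_map.mpr ((List.mem_map.mp hmem).imp (fun r hr => ⟨List.mem_cons_of_mem _ hr.1, hr.2⟩))
        have hmLB : ∀ x ∈ (z :: zt).map (pvKey langs pref), pvLexLe m x := by
          intro x hx
          rcases List.mem_map.mp hx with ⟨r, hr, rfl⟩
          rcases List.mem_cons.mp hr with rfl | hr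
          · exact hle
          · exact hall _ (List.mem_map_of_mem hr)
        have hEq : m = (-val, h) := pvLexLe_antisymm (hmLB _ hMem) (hLB _ hmK)
        rw [hfold]
        dsimp only
        rw [hs]
        simp [hEq]

-- ===== VERDICT (by name: the statement is the Claim_ definition above) =====
theorem solution_spec : Claim_equal_solution := by
  intro table langs pref _hdom hpre
  unfold Spec_solution
  rw [pvA_eq, pvB_eq, pvSelect langs pref (table.map pvSp) (by simpa using hpre)]
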